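-- pv_equiv track=rewrite | github.com/kzhou-cloud/sf_streets_public | utils.py | process_primary_language
-- ===== SOURCE A (Python) =====
-- def process_primary_language(text):
--     # Split languages and normalize Chinese variants
--     languages = text.split(", ")
--     normalized = []
--     for lang in languages:
--         # Merge Mandarin and Cantonese into Chinese
--         if lang.lower() in ['mandarin', 'cantonese']:
--             normalized.append('Chinese')
--         else:
--             normalized.append(lang)
--
--     # Remove duplicates by converting to set, then sort
--     unique_languages = sorted(set(normalized))
--     return str(unique_languages)[1:-1]
-- ===== SOURCE B (Python) =====
-- def process_primary_language(text):
--     # Normalize each token, sort the full list (duplicates included), then one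
--     # adjacent-dedup pass over the sorted list, and format with repr-join
--     # (equal to str(list)[1:-1]).
--     ordered = sorted(
--         'Chinese' if lang.lower() in ('mandarin', 'cantonese') else lang
--         for lang in text.split(", ")
--     )
--     result = []
--     for lang in ordered:
--         if not result or lang != result[-1]:
--             result.append(lang)
--     return ", ".join(map(repr, result))
-- ===== Notes on version B (the rewrite author's own statement) =====
-- stated objective: alternative
-- what changed: Replaces A's append-loop + set()-dedup-then-sort + str(list)[1:-1] by a comprehension, sorting the full normalized list with duplicates, a single adjacent-dedup pass over the sorted list, and joining the token reprs directly.
import Mathlib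
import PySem

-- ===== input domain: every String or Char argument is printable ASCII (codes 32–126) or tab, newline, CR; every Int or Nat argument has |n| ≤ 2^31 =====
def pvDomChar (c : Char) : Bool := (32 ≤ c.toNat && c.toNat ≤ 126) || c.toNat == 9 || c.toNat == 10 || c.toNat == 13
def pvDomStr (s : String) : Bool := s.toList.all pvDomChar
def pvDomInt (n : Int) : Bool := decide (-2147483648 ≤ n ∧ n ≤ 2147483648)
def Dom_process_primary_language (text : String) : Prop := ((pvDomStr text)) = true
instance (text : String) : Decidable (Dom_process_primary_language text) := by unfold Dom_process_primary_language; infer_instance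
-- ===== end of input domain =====

-- B changes the decomposition: sort the full normalized list and do one adjacent-dedup pass,
-- then join the reprs directly, instead of A's append-loop, set() dedup and str(list)[1:-1].

-- shared helpers: Python primitives both sources call
-- text.split(sep) for sep ≠ "" (here sep = ", "), via PySem.Chars.splitOn
def pySplitCS (s : String) (sep : String) : List String :=
  (PySem.Chars.splitOn s.toList sep.toList).map String.ofList

-- repr(s) for a Python str: exact on the Dom_ character set (printable ASCII, tab, newline, CR):
-- quote choice (double quotes iff s contains ' but no "), backslash/quote escaped, \t \n \r escaped
def pyReprChars (s : List Char) : List Char :=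
  let q : Char := if '\'' ∈ s ∧ '"' ∉ s then '"' else '\''
  q :: s.flatMap (fun c =>
      if c = '\\' then ['\\', '\\']
      else if c = q then ['\\', q]
      else if c = '\t' then ['\\', 't']
      else if c = '\n' then ['\\', 'n']
      else if c = '\r' then ['\\', 'r']
      else [c]) ++ [q]

def pyReprStr (s : String) : String := String.ofList (pyReprChars s.toList)

-- str(us) for us : list[str] — '[' + ', '-joined reprs + ']'
def pyStrOfStrList (us : List String) : String :=
  String.ofList ('[' :: PySem.Chars.join (", ".toList) (us.map (fun u => pyReprChars u.toList)) ++ [']'])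

-- ===== PORT A =====
def process_primary_language (text : String) : String :=
  let languages := pySplitCS text ", "
  let normalized := languages.foldl (fun acc lang =>
    if PySem.Str.lower lang ∈ ["mandarin", "cantonese"] then acc ++ ["Chinese"]
    else acc ++ [lang]) []
  let unique_languages := PySem.List.sorted (PySem.Set.ofList normalized) (fun x => x) false
  PySem.Str.slice (pyStrOfStrList unique_languages) (some 1) (some (-1))

-- ===== PORT B =====
def process_primary_language_alt (text : String) : String :=
  let ordered := PySem.List.sorted
    ((pySplitCS text ", ").map (fun lang =>
      if PySem.Str.lower lang ∈ ["mandarin", "cantonese"] then "Chinese" else lang))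
    (fun x => x) false
  -- 'if not result or lang != result[-1]': result[-1] on a nonempty list is getLast?
  let result := ordered.foldl
    (fun acc lang => if acc = [] ∨ acc.getLast? ≠ some lang then acc ++ [lang] else acc) []
  PySem.Str.join ", " (result.map pyReprStr)

-- ===== PRECONDITION & SPEC =====
def Spec_process_primary_language (text : String) (out : String) : Prop := out = process_primary_language_alt text
instance (text : String) (out : String) : Decidable (Spec_process_primary_language text out) := by unfold Spec_process_primary_language; infer_instance

-- ===== CLAIM (what is proved, stated in full; the proofs are below) =====
def Claim_equal_process_primary_language : Prop := ∀ (text : String), Dom_process_primary_language text → Spec_process_primary_language text (process_primary_language text)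

-- ===== LEMMAS AND PROOFS =====

-- the state of B's dedup loop once one element p has been appended last
def dedupFrom (p : String) : List String → List String
  | [] => [p]
  | x :: t => if x = p then dedupFrom p t else p :: dedupFrom x t

lemma foldl_dedup_step (l : List String) : ∀ (acc : List String) (p : String),
    List.foldl (fun acc lang => if acc = [] ∨ acc.getLast? ≠ some lang then acc ++ [lang] else acc)
      (acc ++ [p]) l = acc ++ dedupFrom p l := by
  induction l with
  | nil => intro acc p; simp [dedupFrom]
  | cons x t ih =>
    intro acc p
    by_cases hxp : x = p
    · subst hxp
      simp only [List.foldl_cons, dedupFrom]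
      rw [if_neg (by simp)]
      exact ih acc x
    · simp only [List.foldl_cons, dedupFrom, if_neg hxp]
      rw [if_pos (by simp; exact fun h => hxp h.symm)]
      rw [List.append_assoc] at *
      have := ih (acc ++ [p]) x
      simpa using this
  
lemma mem_dedupFrom (a : String) : ∀ (l : List String) (p : String),
    a ∈ dedupFrom p l ↔ a = p ∨ a ∈ l := by
  intro l
  induction l with
  | nil => intro p; simp [dedupFrom]
  | cons x t ih =>
    intro p
    by_cases hxp : x = p
    · subst hxp; simp [dedupFrom, ih]
    · simp [dedupFrom, if_neg hxp, ih]

lemma pairwise_dedupFrom : ∀ (l : List String) (p : String),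
    (p :: l).Pairwise (· ≤ ·) → (dedupFrom p l).Pairwise (· < ·) := by
  intro l
  induction l with
  | nil => intro p _; simp [dedupFrom]
  | cons x t ih =>
    intro p h
    rcases List.pairwise_cons.mp h with ⟨hp, hxt⟩
    by_cases hxp : x = p
    · subst hxp
      simp only [dedupFrom]
      rw [if_true]
      exact ih x hxt
    · simp only [dedupFrom, if_neg hxp]
      refine List.pairwise_cons.mpr ⟨?_, ih x hxt⟩
      intro a ha
      have hpx : p < x := lt_of_le_of_ne (hp x (by simp)) (Ne.symm hxp)
      rcases (mem_dedupFrom a t x).mp ha with rfl | hat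
      · exact hpx
      · exact lt_of_lt_of_le hpx ((List.pairwise_cons.mp hxt).1 a hat)

lemma nodup_dedupFrom (l : List String) (p : String)
    (h : (p :: l).Pairwise (· ≤ ·)) : (dedupFrom p l).Nodup :=
  (pairwise_dedupFrom l p h).imp (fun hab => ne_of_lt hab)

-- sorted(set(norm)) equals B's sort-then-adjacent-dedup result
lemma sorted_set_eq_dedup (norm : List String) :
    PySem.List.sorted (PySem.Set.ofList norm) (fun x => x) false =
      (PySem.List.sorted norm (fun x => x) false).foldl
        (fun acc lang => if acc = [] ∨ acc.getLast? ≠ some lang then acc ++ [lang] else acc) [] := by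
  rcases h : PySem.List.sorted norm (fun x => x) false with _ | ⟨m, t⟩
  · have : norm = [] := (PySem.List.sorted_eq_nil_iff norm _ false).mp h
    subst this
    rfl
  · have hres : List.foldl (fun acc lang => if acc = [] ∨ acc.getLast? ≠ some lang then acc ++ [lang] else acc)
        [] (m :: t) = dedupFrom m t := by
      simp only [List.foldl_cons, true_or, if_true]
      simpa using foldl_dedup_step t [] m
    rw [hres]
    have hpw : (m :: t).Pairwise (· ≤ ·) := by
      have := PySem.List.sorted_pairwise norm (fun x => x)
      rwa [h] at this
    apply PySem.List.sorted_eq_of_perm_of_pairwise_lt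
    · rw [List.perm_ext_iff_of_nodup (nodup_dedupFrom t m hpw) (PySem.Set.nodup_ofList norm)]
      intro a
      rw [mem_dedupFrom, PySem.Set.mem_ofList]
      have : a = m ∨ a ∈ t ↔ a ∈ m :: t := by simp
      rw [this, ← h, PySem.List.mem_sorted]
    · exact pairwise_dedupFrom t m hpw

-- slicing off the brackets of str(list)
lemma slice_brackets (inner : List Char) :
    PySem.List.slice ('[' :: inner ++ [']']) (some 1) (some (-1)) = inner := by
  have h1 : ¬ ((inner.length : Int) + 1 < 0) := by omega
  simp [PySem.List.slice, PySem.List.clampIdx, h1]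

-- ===== VERDICT (by name: the statement is the Claim_ definition above) =====
theorem process_primary_language_spec : Claim_equal_process_primary_language := by
  intro text _
  unfold Spec_process_primary_language process_primary_language process_primary_language_alt
  -- A's append loop is the map B uses
  have hfold : ∀ (ls : List String),
      ls.foldl (fun acc lang =>
        if PySem.Str.lower lang ∈ ["mandarin", "cantonese"] then acc ++ ["Chinese"]
        else acc ++ [lang]) [] =
      ls.map (fun lang => if PySem.Str.lower lang ∈ ["mandarin", "cantonese"] then "Chinese" else lang) := by
    intro ls
    have hfun : (fun (acc : List String) lang =>
        if PySem.Str.lower lang ∈ ["mandarin", "cantonese"] then acc ++ ["Chinese"]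
        else acc ++ [lang]) = (fun acc lang => acc ++ [if PySem.Str.lower lang ∈ ["mandarin", "cantonese"] then "Chinese" else lang]) := by
      funext acc lang; split <;> rfl
    rw [hfun, PySem.List.foldl_append_singleton_eq_map]; rfl
  dsimp only
  rw [hfold]
  set norm := (pySplitCS text ", ").map
    (fun lang => if PySem.Str.lower lang ∈ ["mandarin", "cantonese"] then "Chinese" else lang) with hnorm
  rw [sorted_set_eq_dedup norm]
  set us := (PySem.List.sorted norm (fun x => x) false).foldl
      (fun acc lang => if acc = [] ∨ acc.getLast? ≠ some lang then acc ++ [lang] else acc) [] with hus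
  -- both sides are now built from the same list us; compare as char lists
  apply String.toList_inj.mp
  rw [PySem.Str.toList_slice]
  simp only [pyStrOfStrList, String.toList_ofList, PySem.Chars.slice_eq_listSlice]
  rw [slice_brackets]
  rw [PySem.Str.toList_join]
  simp [List.map_map, Function.comp_def, pyReprStr]
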